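-- pv_equiv track=rewrite | github.com/Ascend/pytorch | test/run_test.py | find_test_index
-- ===== SOURCE A (Python) =====
-- def find_test_index(test, selected_tests, find_last_index=False):
--     """Find the index of the first or last occurrence of a given test/test module in the list of selected tests.
--     """
--     idx = 0
--     found_idx = -1
--     for t in selected_tests:
--         if t.startswith(test):
--             found_idx = idx
--             if not find_last_index:
--                 break
--         idx += 1
--     return found_idx
-- ===== SOURCE B (Python) =====
-- def find_test_index(test, selected_tests, find_last_index=False):
--     if find_last_index:
--         # scan backward, stop at the first hit from the end
--         for i in range(len(selected_tests) - 1, -1, -1):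
--             if selected_tests[i].startswith(test):
--                 return i
--         return -1
--     for i, t in enumerate(selected_tests):
--         if t.startswith(test):
--             return i
--     return -1
-- ===== Notes on version B (the rewrite author's own statement) =====
-- stated objective: alternative
-- what changed: Splits on find_last_index: forward short-circuiting enumerate scan for the first index, and a reversed-index scan (range(len-1,-1,-1)) that stops at the first hit from the end for the last index, replacing A's single full forward scan that keeps overwriting found_idx.
import Mathlib
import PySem

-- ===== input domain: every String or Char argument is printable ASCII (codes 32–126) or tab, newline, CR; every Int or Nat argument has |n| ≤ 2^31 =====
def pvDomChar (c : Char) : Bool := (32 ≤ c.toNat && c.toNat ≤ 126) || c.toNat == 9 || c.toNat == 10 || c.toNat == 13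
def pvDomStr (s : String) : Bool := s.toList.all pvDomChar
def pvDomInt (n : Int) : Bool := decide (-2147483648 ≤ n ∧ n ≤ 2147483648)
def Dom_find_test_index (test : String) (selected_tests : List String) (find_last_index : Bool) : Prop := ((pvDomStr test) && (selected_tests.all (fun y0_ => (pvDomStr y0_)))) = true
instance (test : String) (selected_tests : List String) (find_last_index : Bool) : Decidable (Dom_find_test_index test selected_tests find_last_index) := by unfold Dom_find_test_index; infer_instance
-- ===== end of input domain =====

-- B replaces A's single full forward scan (keeping the last match) by two short-circuiting
-- scans: forward for the first index, backward (reversed index range) for the last index.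

-- ===== PORT A =====
-- A's single loop: idx counter, found_idx accumulator, break when not find_last_index.
def fti_loopA (test : String) (find_last_index : Bool) : List String → Int → Int → Int
  | [], _, found => found
  | t :: ts, idx, found =>
    if PySem.Str.startswith t test then
      if !find_last_index then idx
      else fti_loopA test find_last_index ts (idx + 1) idx
    else fti_loopA test find_last_index ts (idx + 1) found

def find_test_index (test : String) (selected_tests : List String) (find_last_index : Bool) : Int :=
  fti_loopA test find_last_index selected_tests 0 (-1)

-- ===== PORT B =====
-- forward loop over enumerate(selected_tests), early return
def fti_fwd (test : String) : List (Int × String) → Int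
  | [] => -1
  | (i, t) :: rest => if PySem.Str.startswith t test then i else fti_fwd test rest

-- backward loop over range(len-1, -1, -1); selected_tests[i] with i always in range,
-- ported as pyGetD with default "" (exact: every produced index is in range)
def fti_bwd (test : String) (selected_tests : List String) : List Int → Int
  | [] => -1
  | i :: is =>
    if PySem.Str.startswith (PySem.List.pyGetD selected_tests i "") test then i
    else fti_bwd test selected_tests is

def find_test_index_alt (test : String) (selected_tests : List String) (find_last_index : Bool) : Int :=
  if find_last_index then
    fti_bwd test selected_tests (PySem.List.pyRange ((selected_tests.length : Int) - 1) (-1) (-1))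
  else
    fti_fwd test (PySem.List.enumerate selected_tests 0)

-- ===== PRECONDITION & SPEC =====
def Spec_find_test_index (test : String) (selected_tests : List String) (find_last_index : Bool) (out : Int) : Prop := out = find_test_index_alt test selected_tests find_last_index
instance (test : String) (selected_tests : List String) (find_last_index : Bool) (out : Int) : Decidable (Spec_find_test_index test selected_tests find_last_index out) := by unfold Spec_find_test_index; infer_instance

-- ===== CLAIM (what is proved, stated in full; the proofs are below) =====
def Claim_equal_find_test_index : Prop := ∀ (test : String) (selected_tests : List String) (find_last_index : Bool), Dom_find_test_index test selected_tests find_last_index → Spec_find_test_index test selected_tests find_last_index (find_test_index test selected_tests find_last_index)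

-- ===== LEMMAS AND PROOFS =====

-- first-index case: A's loop with break = forward early-return scan over enumerate
theorem fti_first (test : String) (ts : List String) (idx : Int) :
    fti_loopA test false ts idx (-1) = fti_fwd test (PySem.List.enumerate ts idx) := by
  induction ts generalizing idx with
  | nil => simp [fti_loopA, PySem.List.enumerate_nil, fti_fwd]
  | cons t ts ih =>
    rw [PySem.List.enumerate_cons]
    simp only [fti_loopA, fti_fwd, Bool.not_false, if_true]
    split_ifs with h
    · rfl
    · exact ih (idx + 1)

-- last-index case, A side: appending an element
theorem fti_loopA_append (test : String) (ts : List String) (t : String) (idx found : Int) :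
    fti_loopA test true (ts ++ [t]) idx found =
      if PySem.Str.startswith t test then idx + ts.length
      else fti_loopA test true ts idx found := by
  induction ts generalizing idx found with
  | nil => simp [fti_loopA]
  | cons u us ih =>
    simp only [List.cons_append, fti_loopA, Bool.not_true, Bool.false_eq_true, if_false, ih]
    by_cases ht : PySem.Str.startswith t test = true <;>
      by_cases hu : PySem.Str.startswith u test = true <;>
        simp only [ht, hu, if_true, List.length_cons] <;>
        (push_cast; omega)

-- fti_bwd only looks at in-range indices, so ts ++ [t] behaves like ts there
theorem fti_bwd_append_irrel (test : String) (ts : List String) (t : String)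
    (is : List Int) (h : ∀ i ∈ is, 0 ≤ i ∧ i < (ts.length : Int)) :
    fti_bwd test (ts ++ [t]) is = fti_bwd test ts is := by
  induction is with
  | nil => rfl
  | cons i is ih =>
    have hi := h i (by simp)
    have hget : PySem.List.pyGetD (ts ++ [t]) i "" = PySem.List.pyGetD ts i "" := by
      rw [PySem.List.pyGetD_eq_getElem (ts ++ [t]) "" hi.1 (by push_cast; simp; omega),
          PySem.List.pyGetD_eq_getElem ts "" hi.1 hi.2]
      rw [List.getElem_append_left]
    simp only [fti_bwd, hget]
    split_ifs with hs
    · rfl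
    · exact ih (fun j hj => h j (by simp [hj]))

-- last-index case, B side: appending an element
theorem fti_bwd_append (test : String) (ts : List String) (t : String) :
    fti_bwd test (ts ++ [t]) (PySem.List.pyRange (((ts ++ [t]).length : Int) - 1) (-1) (-1)) =
      if PySem.Str.startswith t test then (ts.length : Int)
      else fti_bwd test ts (PySem.List.pyRange ((ts.length : Int) - 1) (-1) (-1)) := by
  have hlen : (((ts ++ [t]).length : Int) - 1) = (ts.length : Int) := by
    push_cast; simp
  rw [hlen, PySem.List.pyRange_neg_one_cons (by omega)]
  have hget : PySem.List.pyGetD (ts ++ [t]) (ts.length : Int) "" = t := by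
    rw [PySem.List.pyGetD_eq_getElem (ts ++ [t]) "" (by omega) (by push_cast; simp)]
    simp
  simp only [fti_bwd, hget]
  split_ifs with hs
  · rfl
  · exact fti_bwd_append_irrel test ts t _ (fun i hi => by
      rw [PySem.List.mem_pyRange_neg_one] at hi
      omega)

-- last-index case: A's full scan = B's backward early-exit scan
theorem fti_last (test : String) (sel : List String) :
    fti_loopA test true sel 0 (-1) =
      fti_bwd test sel (PySem.List.pyRange ((sel.length : Int) - 1) (-1) (-1)) := by
  induction sel using List.reverseRecOn with
  | nil => rw [PySem.List.pyRange_neg_one_eq_nil (by simp)]; rfl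
  | append_singleton ts t ih =>
    rw [fti_loopA_append, fti_bwd_append, ih]
    simp

-- ===== VERDICT (by name: the statement is the Claim_ definition above) =====
theorem find_test_index_spec : Claim_equal_find_test_index := by
  intro test sel last _
  unfold Spec_find_test_index find_test_index find_test_index_alt
  cases last with
  | false => simpa using fti_first test sel 0
  | true => simpa using fti_last test sel
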